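-- pv_equiv track=rewrite | github.com/aiaanad/asd-2sem | lab_1/src/task15.py | delSeq
-- ===== SOURCE A (Python) =====
-- def is_match(a, b):
--     return (a == '(' and b == ')') or (a == '{' and b == '}') or (a == '[' and b == ']')
--
-- def delSeq(s: str) -> str:
--     n = len(s)
--     dp = [['' for _ in range(n)] for _ in range(n)]
--     for _len in range(1, n + 1):
--         r = _len - 1
--         for l in range(n):
--             if r >= n or l > r:
--                 continue
--
--             if _len == 2:
--                 if is_match(s[l], s[r]):
--                     dp[l][r] = s[l]+s[r]
--
--             elif _len > 2:
--                 if is_match(s[l], s[r]):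
--                     dp[l][r] = s[l] + dp[l+1][r-1] + s[r]
--
--                 else:
--                     for m in range(l+1, r):
--                         dp[l][r] = max(dp[l][r], (dp[l][m]+dp[m+1][r]), key=len)
--             r += 1
--     return dp[0][n-1]
-- ===== SOURCE B (Python) =====
-- def is_match(a, b):
--     return (a == '(' and b == ')') or (a == '{' and b == '}') or (a == '[' and b == ']')
--
-- def delSeq(s: str) -> str:
--     # Length table (ints) + reconstruction replaying the same leftmost-max choices.
--     n = len(s)
--     if n == 0:
--         return ''
--     L = [[0] * n for _ in range(n)]
--     for length in range(2, n + 1):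
--         for l in range(0, n - length + 1):
--             r = l + length - 1
--             if is_match(s[l], s[r]):
--                 L[l][r] = 2 + (L[l + 1][r - 1] if length > 2 else 0)
--             else:
--                 best = 0
--                 for m in range(l + 1, r):
--                     t = L[l][m] + L[m + 1][r]
--                     if t > best:
--                         best = t
--                 L[l][r] = best
--
--     def build(l, r):
--         if l >= r or L[l][r] == 0:
--             return ''
--         if is_match(s[l], s[r]):
--             return s[l] + (build(l + 1, r - 1) if r - l > 1 else '') + s[r]
--         for m in range(l + 1, r):
--             if L[l][m] + L[m + 1][r] == L[l][r]:
--                 return build(l, m) + build(m + 1, r)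
--
--     return build(0, n - 1)
-- ===== Notes on version B (the rewrite author's own statement) =====
-- stated objective: faster
-- what changed: A fills an n x n table of strings (each split step concatenates and compares whole strings, O(n^4) total); B fills an n x n table of integer lengths with the same recurrence and then reconstructs one answer string by replaying the same leftmost-max split choices (O(n^3)); intended as faster: measured ~4.3x at n=256, both time out at n=1024.
import Mathlib
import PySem

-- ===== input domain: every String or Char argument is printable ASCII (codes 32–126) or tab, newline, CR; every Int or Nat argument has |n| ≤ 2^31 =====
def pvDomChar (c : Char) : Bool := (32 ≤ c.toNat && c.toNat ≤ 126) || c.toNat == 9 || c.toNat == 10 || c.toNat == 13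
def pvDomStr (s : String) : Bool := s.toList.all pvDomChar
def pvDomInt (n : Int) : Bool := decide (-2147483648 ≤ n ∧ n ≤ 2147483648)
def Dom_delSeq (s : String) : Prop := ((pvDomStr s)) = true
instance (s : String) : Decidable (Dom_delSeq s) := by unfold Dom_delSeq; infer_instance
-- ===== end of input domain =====

-- B stores interval LENGTHS (ints) in the table instead of strings and reconstructs one answer
-- string by replaying the same leftmost-max choices (intended as faster; measured ~4.3x at n=256).

-- ===== PORT A =====
-- is_match(a, b)
def pvMatch (a b : Char) : Bool :=
  (a == '(' && b == ')') || (a == '{' && b == '}') || (a == '[' && b == ']')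

-- max(a, b, key=len): b only when strictly longer (Python's max keeps the first on ties)
def pvMaxLen (a b : List Char) : List Char := if a.length < b.length then b else a

-- body of A's `for l in range(n)` loop (state: the table dp and the running r);
-- the 2D table dp is kept as a dictionary keyed by (row, column); dp[l][r] reads are getD
def pvAinner (c : Nat → Char) (n len : Nat)
    (st : PySem.Dict (Nat × Nat) (List Char) × Nat) (l : Nat) :
    PySem.Dict (Nat × Nat) (List Char) × Nat :=
  let dp := st.1
  let r := st.2
  if n ≤ r ∨ r < l then st          -- continue (skips the r += 1)
  else
    let dp :=
      if len = 2 then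
        (if pvMatch (c l) (c r) then dp.insert (l, r) [c l, c r] else dp)
      else if 2 < len then
        (if pvMatch (c l) (c r) then
           dp.insert (l, r) (c l :: (dp.getD (l+1, r-1) [] ++ [c r]))
         else
           (List.range' (l+1) (r - (l+1))).foldl
             (fun dp m => dp.insert (l, r)
               (pvMaxLen (dp.getD (l, r) []) (dp.getD (l, m) [] ++ dp.getD (m+1, r) []))) dp)
      else dp
    (dp, r + 1)

-- body of A's `for _len in range(1, n+1)` loop
def pvAouter (c : Nat → Char) (n : Nat)
    (dp : PySem.Dict (Nat × Nat) (List Char)) (len : Nat) :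
    PySem.Dict (Nat × Nat) (List Char) :=
  ((List.range n).foldl (pvAinner c n len) (dp, len - 1)).1

def delSeq (s : String) : String :=
  let cs := s.toList
  let n := cs.length
  let c : Nat → Char := fun i => cs.getD i ' '   -- s[i]; every access is in range
  let dp := (List.range' 1 n).foldl (pvAouter c n) PySem.Dict.empty
  String.ofList (dp.getD (0, n - 1) [])

-- ===== PORT B =====
-- build(l, r): reconstruct one answer string from the length table
def pvBuild (c : Nat → Char) (t : PySem.Dict (Nat × Nat) Nat) (l r : Nat) : List Char :=
  if _h1 : r ≤ l then []                           -- l >= r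
  else if t.getD (l, r) 0 = 0 then []
  else if pvMatch (c l) (c r) then
    c l :: ((if _h2 : 1 < r - l then pvBuild c t (l+1) (r-1) else []) ++ [c r])
  else
    -- first m with L[l][m] + L[m+1][r] == L[l][r]  (the loop with early return)
    match hm : (List.range' (l+1) (r - (l+1))).find?
        (fun m => t.getD (l, m) 0 + t.getD (m+1, r) 0 == t.getD (l, r) 0) with
    | some m => pvBuild c t l m ++ pvBuild c t (m+1) r
    | none => []
termination_by r - l
decreasing_by
  · omega
  · have := List.mem_range'_1.mp (List.mem_of_find?_eq_some hm); omega
  · have := List.mem_range'_1.mp (List.mem_of_find?_eq_some hm); omega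

-- body of B's `for l in range(n - length + 1)` loop
def pvBinner (c : Nat → Char) (len : Nat)
    (t : PySem.Dict (Nat × Nat) Nat) (l : Nat) : PySem.Dict (Nat × Nat) Nat :=
  let r := l + len - 1
  if pvMatch (c l) (c r) then
    t.insert (l, r) (2 + (if 2 < len then t.getD (l+1, r-1) 0 else 0))
  else
    t.insert (l, r) ((List.range' (l+1) (r - (l+1))).foldl
      (fun best m =>
        let v := t.getD (l, m) 0 + t.getD (m+1, r) 0
        if best < v then v else best) 0)

-- body of B's `for length in range(2, n + 1)` loop
def pvBouter (c : Nat → Char) (n : Nat)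
    (t : PySem.Dict (Nat × Nat) Nat) (len : Nat) : PySem.Dict (Nat × Nat) Nat :=
  (List.range (n - len + 1)).foldl (pvBinner c len) t

def delSeq_alt (s : String) : String :=
  let cs := s.toList
  let n := cs.length
  if n = 0 then "" else
  let c : Nat → Char := fun i => cs.getD i ' '
  let t := (List.range' 2 (n - 1)).foldl (pvBouter c n) PySem.Dict.empty
  String.ofList (pvBuild c t 0 (n - 1))

-- ===== PRECONDITION & SPEC =====
-- Pre_ excludes only the empty string, on which A raises IndexError (dp[0][-1] on an empty table).
def Pre_delSeq (s : String) : Prop := s ≠ ""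
instance (s : String) : Decidable (Pre_delSeq s) := by unfold Pre_delSeq; infer_instance
def pvWitness_delSeq : String := "()"

def Spec_delSeq (s : String) (out : String) : Prop := out = delSeq_alt s
instance (s : String) (out : String) : Decidable (Spec_delSeq s out) := by unfold Spec_delSeq; infer_instance

-- ===== CLAIM (what is proved, stated in full; the proofs are below) =====
def Claim_equal_delSeq : Prop := ∀ (s : String), Dom_delSeq s → Pre_delSeq s → Spec_delSeq s (delSeq s)

-- ===== LEMMAS AND PROOFS =====

-- the common recursion both ports compute: A's dp[l][r] string, which B recomputes
-- as a length and then rebuilds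
def pvG (c : Nat → Char) (l r : Nat) : List Char :=
  if _h1 : r ≤ l then []
  else if _h2 : r = l + 1 then (if pvMatch (c l) (c r) then [c l, c r] else [])
  else if pvMatch (c l) (c r) then c l :: (pvG c (l+1) (r-1) ++ [c r])
  else (List.range' (l+1) (r - (l+1))).attach.foldl
        (fun a m => pvMaxLen a (pvG c l m.1 ++ pvG c (m.1+1) r)) []
termination_by r - l
decreasing_by
  · omega
  · have := List.mem_range'_1.mp m.2; omega
  · have := List.mem_range'_1.mp m.2; omega

-- dp[l][m] + dp[m+1][r], the split candidate at m
def pvCand (c : Nat → Char) (l r m : Nat) : List Char := pvG c l m ++ pvG c (m+1) r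

-- running maximum (by length, first wins ties) over the candidates g m
def pvRun (g : Nat → List Char) (ms : List Nat) (acc : List Char) : List Char :=
  ms.foldl (fun a m => pvMaxLen a (g m)) acc

lemma pvG_nil (c : Nat → Char) {l r : Nat} (h : r ≤ l) : pvG c l r = [] := by
  unfold pvG; rw [dif_pos h]

lemma pvG_two (c : Nat → Char) {l r : Nat} (h : r = l + 1) :
    pvG c l r = if pvMatch (c l) (c r) then [c l, c r] else [] := by
  unfold pvG; rw [dif_neg (by omega), dif_pos h]

lemma pvG_match (c : Nat → Char) {l r : Nat} (h1 : l + 1 < r) (h3 : pvMatch (c l) (c r) = true) :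
    pvG c l r = c l :: (pvG c (l+1) (r-1) ++ [c r]) := by
  conv_lhs => unfold pvG
  rw [dif_neg (by omega), dif_neg (by omega), if_pos h3]

lemma pvG_split (c : Nat → Char) {l r : Nat} (h1 : l + 1 < r) (h3 : pvMatch (c l) (c r) = false) :
    pvG c l r = pvRun (pvCand c l r) (List.range' (l+1) (r - (l+1))) [] := by
  unfold pvG; rw [dif_neg (by omega), dif_neg (by omega), if_neg (by simp [h3])]
  rw [pvRun]
  show (List.range' (l+1) (r - (l+1))).attach.foldl
      (fun a m => (fun (a : List Char) (m : Nat) => pvMaxLen a (pvCand c l r m)) a m.1) []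
    = (List.range' (l+1) (r - (l+1))).foldl (fun a m => pvMaxLen a (pvCand c l r m)) []
  exact @List.foldl_attach Nat (List Char) (List.range' (l+1) (r - (l+1)))
    (fun a m => pvMaxLen a (pvCand c l r m)) []

lemma pvMaxLen_length (a b : List Char) :
    (pvMaxLen a b).length = if a.length < b.length then b.length else a.length := by
  unfold pvMaxLen; split_ifs <;> rfl

lemma pvRun_mono (g : Nat → List Char) :
    ∀ (ms : List Nat) (acc : List Char), acc.length ≤ (pvRun g ms acc).length := by
  intro ms
  induction ms with
  | nil => intro acc; simp [pvRun]
  | cons m t ih =>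
      intro acc
      have h2 := ih (pvMaxLen acc (g m))
      have h1 : acc.length ≤ (pvMaxLen acc (g m)).length := by
        rw [pvMaxLen_length]; split_ifs <;> omega
      calc acc.length ≤ (pvMaxLen acc (g m)).length := h1
        _ ≤ _ := h2

lemma pvRun_spec (g : Nat → List Char) :
    ∀ (ms : List Nat) (acc : List Char),
      ((pvRun g ms acc).length ≤ acc.length → pvRun g ms acc = acc) ∧
      (acc.length < (pvRun g ms acc).length →
        ∃ m, ms.find? (fun m => (g m).length == (pvRun g ms acc).length) = some m ∧
          pvRun g ms acc = g m) := by
  intro ms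
  induction ms with
  | nil => intro acc; constructor
           · intro _; rfl
           · intro h; simp [pvRun] at h
  | cons m t ih =>
      intro acc
      have hrun : pvRun g (m :: t) acc = pvRun g t (pvMaxLen acc (g m)) := rfl
      by_cases hcmp : acc.length < (g m).length
      · have hacc' : pvMaxLen acc (g m) = g m := by unfold pvMaxLen; rw [if_pos hcmp]
        have hmono := pvRun_mono g t (pvMaxLen acc (g m))
        rw [hacc'] at hmono
        constructor
        · intro h
          rw [hrun, hacc'] at h
          exact absurd h (by omega)
        · intro _
          rw [hrun, hacc']
          rcases Nat.lt_or_ge (g m).length (pvRun g t (g m)).length with hlt | hge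
          · obtain ⟨m', hf, he⟩ := (ih (g m)).2 hlt
            refine ⟨m', ?_, he⟩
            rw [List.find?_cons]
            have : ((g m).length == (pvRun g t (g m)).length) = false := by
              simp; omega
            rw [this]; exact hf
          · have heq : pvRun g t (g m) = g m := (ih (g m)).1 hge
            refine ⟨m, ?_, heq⟩
            rw [List.find?_cons]
            have : ((g m).length == (pvRun g t (g m)).length) = true := by
              rw [heq]; simp
            rw [this]
      · have hacc' : pvMaxLen acc (g m) = acc := by unfold pvMaxLen; rw [if_neg hcmp]
        rw [hrun, hacc']
        constructor
        · intro h; exact (ih acc).1 h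
        · intro h
          obtain ⟨m', hf, he⟩ := (ih acc).2 h
          refine ⟨m', ?_, he⟩
          rw [List.find?_cons]
          have : ((g m).length == (pvRun g t acc).length) = false := by
            simp; omega
          rw [this]; exact hf

lemma pvRun_len (g : Nat → List Char) (f : Nat → Nat) :
    ∀ (ms : List Nat) (acc : List Char) (b : Nat), b = acc.length →
      (∀ m ∈ ms, f m = (g m).length) →
      ms.foldl (fun b m => if b < f m then f m else b) b = (pvRun g ms acc).length := by
  intro ms
  induction ms with
  | nil => intro acc b hb _; simpa [pvRun] using hb
  | cons m t ih =>
      intro acc b hb hf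
      have hm : f m = (g m).length := hf m (by simp)
      have : (if b < f m then f m else b) = (pvMaxLen acc (g m)).length := by
        rw [pvMaxLen_length, hb, hm]
      rw [List.foldl_cons, this]
      exact ih (pvMaxLen acc (g m)) _ rfl (fun m' hm' => hf m' (by simp [hm']))

lemma pvFind_congr {p q : Nat → Bool} :
    ∀ {ms : List Nat}, (∀ m ∈ ms, p m = q m) → ms.find? p = ms.find? q := by
  intro ms
  induction ms with
  | nil => intro _; rfl
  | cons m t ih =>
      intro h
      rw [List.find?_cons, List.find?_cons, h m (by simp)]
      cases hq : q m
      · simp only []; exact ih (fun m' hm' => h m' (by simp [hm']))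
      · rfl

-- ===== A-side invariants =====

def pvAInv (c : Nat → Char) (n k : Nat) (dp : PySem.Dict (Nat × Nat) (List Char)) : Prop :=
  ∀ l r : Nat, dp.getD (l, r) [] = if r < n ∧ r < l + k then pvG c l r else []

def pvAInv2 (c : Nat → Char) (n len j : Nat) (dp : PySem.Dict (Nat × Nat) (List Char)) : Prop :=
  ∀ l r : Nat, dp.getD (l, r) [] =
    if r < n ∧ (r < l + (len - 1) ∨ (r + 1 = l + len ∧ l < j)) then pvG c l r else []

lemma pvAInv2_succ (c : Nat → Char) (n len j : Nat)
    (dp dp' : PySem.Dict (Nat × Nat) (List Char)) (hlen : 1 ≤ len)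
    (hkeep : ∀ l r : Nat, ¬(l = j ∧ r = j + len - 1) → dp'.getD (l, r) [] = dp.getD (l, r) [])
    (hcell : j + len - 1 < n → dp'.getD (j, j + len - 1) [] = pvG c j (j + len - 1))
    (hcell0 : ¬(j + len - 1 < n) → dp'.getD (j, j + len - 1) [] = dp.getD (j, j + len - 1) [])
    (h : pvAInv2 c n len j dp) : pvAInv2 c n len (j + 1) dp' := by
  intro l r
  by_cases hc : l = j ∧ r = j + len - 1
  · obtain ⟨e1, e2⟩ := hc
    rw [e1, e2]
    by_cases hr : j + len - 1 < n
    · rw [hcell hr, if_pos ⟨hr, Or.inr ⟨by omega, by omega⟩⟩]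
    · rw [hcell0 hr, h, if_neg (by omega), if_neg (by omega)]
  · rw [hkeep _ _ hc, h]
    split_ifs with h1 h2 h2
    · rfl
    · exfalso; omega
    · exact absurd ⟨by omega, by omega⟩ hc
    · rfl

-- the inner split loop, rewritten as one update with the running max of the candidates
lemma pvAsplit (c : Nat → Char) (l r : Nat) :
    ∀ (ms : List Nat) (m0 : Nat) (dp : PySem.Dict (Nat × Nat) (List Char)),
      (∀ m ∈ m0 :: ms, l + 1 ≤ m ∧ m < r) →
      (∀ m ∈ m0 :: ms, dp.getD (l, m) [] = pvG c l m ∧ dp.getD (m+1, r) [] = pvG c (m+1) r) →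
      (m0 :: ms).foldl (fun dp m => dp.insert (l, r)
          (pvMaxLen (dp.getD (l, r) []) (dp.getD (l, m) [] ++ dp.getD (m+1, r) []))) dp
      = dp.insert (l, r) (pvRun (pvCand c l r) (m0 :: ms) (dp.getD (l, r) [])) := by
  intro ms
  induction ms with
  | nil =>
      intro m0 dp _ hread
      obtain ⟨e1, e2⟩ := hread m0 (by simp)
      simp only [List.foldl_cons, List.foldl_nil, pvRun, pvCand, e1, e2]
  | cons m1 t ih =>
      intro m0 dp hb hread
      obtain ⟨e1, e2⟩ := hread m0 (by simp)
      obtain ⟨bb1, bb2⟩ := hb m0 (by simp)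
      rw [List.foldl_cons]
      set v1 := pvMaxLen (dp.getD (l, r) []) (dp.getD (l, m0) [] ++ dp.getD (m0+1, r) []) with hv1
      have hb' : ∀ m ∈ m1 :: t, l + 1 ≤ m ∧ m < r := fun m hm => hb m (by simp at hm ⊢; tauto)
      have hread' : ∀ m ∈ m1 :: t,
          (dp.insert (l, r) v1).getD (l, m) [] = pvG c l m ∧
          (dp.insert (l, r) v1).getD (m+1, r) [] = pvG c (m+1) r := by
        intro m hm
        obtain ⟨g1, g2⟩ := hread m (by simp at hm ⊢; tauto)
        obtain ⟨c1, c2⟩ := hb' m hm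
        constructor
        · rw [PySem.Dict.getD_insert, if_neg (by simp; omega), g1]
        · rw [PySem.Dict.getD_insert, if_neg (by simp; omega), g2]
      rw [ih m1 (dp.insert (l, r) v1) hb' hread']
      rw [PySem.Dict.insert_insert_self]
      congr 1
      rw [PySem.Dict.getD_insert, if_pos rfl]
      show pvRun (pvCand c l r) (m1 :: t) v1 = pvRun (pvCand c l r) (m0 :: m1 :: t) (dp.getD (l, r) [])
      rw [pvRun, pvRun, List.foldl_cons (l := m1 :: t)]
      congr 1
      rw [hv1, e1, e2]; rfl

lemma pvAinner_step (c : Nat → Char) (n len j : Nat)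
    (dp : PySem.Dict (Nat × Nat) (List Char)) (hlen : 1 ≤ len) (h : pvAInv2 c n len j dp) :
    pvAInv2 c n len (j + 1) (pvAinner c n len (dp, min (j + len - 1) n) j).1 ∧
    (pvAinner c n len (dp, min (j + len - 1) n) j).2 = min (j + len) n := by
  by_cases hg : n ≤ j + len - 1
  · have hgg : n ≤ min (j + len - 1) n ∨ min (j + len - 1) n < j := Or.inl (by omega)
    unfold pvAinner
    simp only []
    rw [if_pos hgg]
    refine ⟨pvAInv2_succ c n len j dp dp hlen (fun _ _ _ => rfl)
      (fun hr => absurd hr (by omega)) (fun _ => rfl) h, by simp; omega⟩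
  · have hr : j + len - 1 < n := by omega
    have hmin : min (j + len - 1) n = j + len - 1 := by omega
    rw [hmin]
    unfold pvAinner
    simp only []
    rw [if_neg (by omega)]
    refine ⟨?_, by simp; omega⟩
    by_cases h2 : len = 2
    · rw [if_pos h2]
      cases hmch : pvMatch (c j) (c (j + len - 1))
      · simp only [Bool.false_eq_true, if_false]
        refine pvAInv2_succ c n len j dp dp hlen (fun _ _ _ => rfl) ?_ (fun _ => rfl) h
        intro _
        rw [h, if_neg (by omega), pvG_two c (by omega), if_neg (by simp [hmch])]
      · simp only [if_true]
        refine pvAInv2_succ c n len j dp _ hlen ?_ ?_ ?_ h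
        · intro l r hc
          rw [PySem.Dict.getD_insert, if_neg (by simp; tauto)]
        · intro _
          rw [PySem.Dict.getD_insert, if_pos rfl, pvG_two c (by omega), if_pos hmch]
        · intro hcon; exact absurd hr hcon
    · rw [if_neg h2]
      by_cases h3 : 2 < len
      · rw [if_pos h3]
        cases hmch : pvMatch (c j) (c (j + len - 1))
        · simp only [Bool.false_eq_true, if_false]
          -- split loop
          have hcnt : 0 < j + len - 1 - (j + 1) := by omega
          rcases hms : List.range' (j + 1) (j + len - 1 - (j + 1)) with _ | ⟨m0, rest⟩
          · exfalso
            have hlr := congrArg List.length hms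
            rw [List.length_range'] at hlr
            simp at hlr
            omega
          · have hbs : ∀ m ∈ m0 :: rest, j + 1 ≤ m ∧ m < j + len - 1 := by
              intro m hm
              rw [← hms] at hm
              have := List.mem_range'_1.mp hm
              omega
            have hreads : ∀ m ∈ m0 :: rest,
                dp.getD (j, m) [] = pvG c j m ∧
                dp.getD (m+1, j + len - 1) [] = pvG c (m+1) (j + len - 1) := by
              intro m hm
              obtain ⟨c1, c2⟩ := hbs m hm
              constructor
              · rw [h, if_pos ⟨by omega, Or.inl (by omega)⟩]
              · rw [h, if_pos ⟨by omega, Or.inl (by omega)⟩]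
            rw [pvAsplit c j (j + len - 1) rest m0 dp hbs hreads]
            refine pvAInv2_succ c n len j dp _ hlen ?_ ?_ ?_ h
            · intro l r hc
              rw [PySem.Dict.getD_insert, if_neg (by simp; tauto)]
            · intro _
              rw [PySem.Dict.getD_insert, if_pos rfl]
              have hdp0 : dp.getD (j, j + len - 1) [] = [] := by
                rw [h, if_neg (by omega)]
              rw [hdp0, pvG_split c (by omega) (by simpa using hmch), hms]
            · intro hcon; exact absurd hr hcon
        · simp only [if_true]
          refine pvAInv2_succ c n len j dp _ hlen ?_ ?_ ?_ h
          · intro l r hc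
            rw [PySem.Dict.getD_insert, if_neg (by simp; tauto)]
          · intro _
            rw [PySem.Dict.getD_insert, if_pos rfl]
            have hd : dp.getD (j + 1, j + len - 1 - 1) [] = pvG c (j+1) (j + len - 1 - 1) := by
              rw [h, if_pos ⟨by omega, Or.inl (by omega)⟩]
            rw [hd, pvG_match c (by omega) hmch]
          · intro hcon; exact absurd hr hcon
      · -- len = 1
        rw [if_neg h3]
        refine pvAInv2_succ c n len j dp dp hlen (fun _ _ _ => rfl) ?_ (fun _ => rfl) h
        intro _
        have hl1 : len = 1 := by omega
        rw [h, if_neg (by omega), pvG_nil c (by omega)]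

lemma pvAinner_loop (c : Nat → Char) (n len : Nat) (hlen : 1 ≤ len) :
    ∀ (cnt j : Nat) (dp : PySem.Dict (Nat × Nat) (List Char)), pvAInv2 c n len j dp →
      pvAInv2 c n len (j + cnt)
        ((List.range' j cnt).foldl (pvAinner c n len) (dp, min (j + len - 1) n)).1 ∧
      ((List.range' j cnt).foldl (pvAinner c n len) (dp, min (j + len - 1) n)).2
        = min (j + cnt + len - 1) n := by
  intro cnt
  induction cnt with
  | zero =>
      intro j dp h
      refine ⟨h, ?_⟩
      show min (j + len - 1) n = min (j + 0 + len - 1) n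
      omega
  | succ cnt ih =>
      intro j dp h
      rw [List.range'_succ, List.foldl_cons]
      obtain ⟨h1, h2⟩ := pvAinner_step c n len j dp hlen h
      have hst : pvAinner c n len (dp, min (j + len - 1) n) j
          = ((pvAinner c n len (dp, min (j + len - 1) n) j).1, min (j + 1 + len - 1) n) := by
        rw [← show min (j + len) n = min (j + 1 + len - 1) n from by omega, ← h2]
      rw [hst]
      obtain ⟨g1, g2⟩ := ih (j + 1) _ h1
      constructor
      · rw [show j + (cnt + 1) = j + 1 + cnt from by omega]; exact g1
      · rw [g2]; omega

lemma pvAouter_one (c : Nat → Char) (n len : Nat) (h1 : 1 ≤ len) (h2 : len ≤ n)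
    (dp : PySem.Dict (Nat × Nat) (List Char)) (h : pvAInv c n (len - 1) dp) :
    pvAInv c n len (pvAouter c n dp len) := by
  unfold pvAouter
  rw [List.range_eq_range']
  have h0 : pvAInv2 c n len 0 dp := by
    intro l r
    rw [h l r]
    split_ifs with a b b
    · rfl
    · exfalso; omega
    · exfalso; omega
    · rfl
  have hinit : len - 1 = min (0 + len - 1) n := by omega
  rw [hinit]
  obtain ⟨g1, _⟩ := pvAinner_loop c n len h1 n 0 dp h0
  intro l r
  rw [g1 l r]
  split_ifs with a b b
  · rfl
  · exfalso; omega
  · exfalso; omega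
  · rfl

lemma pvAouter_loop (c : Nat → Char) (n : Nat) :
    ∀ (cnt k : Nat) (dp : PySem.Dict (Nat × Nat) (List Char)), k + cnt ≤ n → pvAInv c n k dp →
      pvAInv c n (k + cnt) ((List.range' (k + 1) cnt).foldl (pvAouter c n) dp) := by
  intro cnt
  induction cnt with
  | zero => intro k dp _ h; simpa using h
  | succ cnt ih =>
      intro k dp hb h
      rw [List.range'_succ, List.foldl_cons]
      have hstep : pvAInv c n (k + 1) (pvAouter c n dp (k + 1)) := by
        refine pvAouter_one c n (k + 1) (by omega) (by omega) dp ?_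
        simpa using h
      have := ih (k + 1) _ (by omega) hstep
      rw [show k + (cnt + 1) = k + 1 + cnt from by omega]
      exact this

lemma delSeq_eq (s : String) (h : s.toList ≠ []) :
    delSeq s = String.ofList (pvG (fun i => s.toList.getD i ' ') 0 (s.toList.length - 1)) := by
  have hn : 1 ≤ s.toList.length := by
    rcases Nat.eq_zero_or_pos s.toList.length with h0 | h0
    · exact absurd (List.eq_nil_iff_length_eq_zero.mpr h0) h
    · exact h0
  simp only [delSeq]
  have h0 : pvAInv (fun i => s.toList.getD i ' ') s.toList.length 0 PySem.Dict.empty := by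
    intro l r
    rw [PySem.Dict.getD_empty]
    split_ifs with hh
    · exact (pvG_nil _ (by omega)).symm
    · rfl
  have hall := pvAouter_loop (fun i => s.toList.getD i ' ') s.toList.length s.toList.length 0
    PySem.Dict.empty (by omega) h0
  rw [show (0 : Nat) + 1 = 1 from rfl] at hall
  rw [hall 0 (s.toList.length - 1), if_pos ⟨by omega, by omega⟩]

-- ===== B-side invariants =====

def pvBInv (c : Nat → Char) (n k : Nat) (t : PySem.Dict (Nat × Nat) Nat) : Prop :=
  ∀ l r : Nat, t.getD (l, r) 0 = if r < n ∧ r < l + k then (pvG c l r).length else 0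

def pvBInv2 (c : Nat → Char) (n len j : Nat) (t : PySem.Dict (Nat × Nat) Nat) : Prop :=
  ∀ l r : Nat, t.getD (l, r) 0 =
    if r < n ∧ (r < l + (len - 1) ∨ (r + 1 = l + len ∧ l < j)) then (pvG c l r).length else 0

lemma pvBInv2_succ (c : Nat → Char) (n len j : Nat)
    (t t' : PySem.Dict (Nat × Nat) Nat) (hlen : 1 ≤ len)
    (hkeep : ∀ l r : Nat, ¬(l = j ∧ r = j + len - 1) → t'.getD (l, r) 0 = t.getD (l, r) 0)
    (hcell : j + len - 1 < n → t'.getD (j, j + len - 1) 0 = (pvG c j (j + len - 1)).length)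
    (hcell0 : ¬(j + len - 1 < n) → t'.getD (j, j + len - 1) 0 = t.getD (j, j + len - 1) 0)
    (h : pvBInv2 c n len j t) : pvBInv2 c n len (j + 1) t' := by
  intro l r
  by_cases hc : l = j ∧ r = j + len - 1
  · obtain ⟨e1, e2⟩ := hc
    rw [e1, e2]
    by_cases hr : j + len - 1 < n
    · rw [hcell hr, if_pos ⟨hr, Or.inr ⟨by omega, by omega⟩⟩]
    · rw [hcell0 hr, h, if_neg (by omega), if_neg (by omega)]
  · rw [hkeep _ _ hc, h]
    split_ifs with h1 h2 h2
    · rfl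
    · exfalso; omega
    · exact absurd ⟨by omega, by omega⟩ hc
    · rfl

lemma pvBinner_step (c : Nat → Char) (n len j : Nat)
    (t : PySem.Dict (Nat × Nat) Nat) (hlen : 2 ≤ len) (hr : j + len - 1 < n)
    (h : pvBInv2 c n len j t) : pvBInv2 c n len (j + 1) (pvBinner c len t j) := by
  unfold pvBinner
  simp only []
  cases hmch : pvMatch (c j) (c (j + len - 1))
  · simp only [Bool.false_eq_true, if_false]
    refine pvBInv2_succ c n len j t _ (by omega) ?_ ?_ ?_ h
    · intro l r hc
      rw [PySem.Dict.getD_insert, if_neg (by simp; tauto)]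
    · intro _
      rw [PySem.Dict.getD_insert, if_pos rfl]
      by_cases h2 : len = 2
      · have : j + len - 1 - (j + 1) = 0 := by omega
        rw [this]
        simp only [List.range'_zero, List.foldl_nil]
        rw [pvG_two c (by omega), if_neg (by simp [hmch])]
        rfl
      · rw [pvG_split c (by omega) (by simpa using hmch)]
        refine pvRun_len (pvCand c j (j + len - 1))
          (fun m => t.getD (j, m) 0 + t.getD (m + 1, j + len - 1) 0) _ [] 0 rfl ?_
        intro m hm
        show t.getD (j, m) 0 + t.getD (m + 1, j + len - 1) 0 = (pvCand c j (j + len - 1) m).length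
        have hb := List.mem_range'_1.mp hm
        have e1 : t.getD (j, m) 0 = (pvG c j m).length := by
          rw [h, if_pos ⟨by omega, Or.inl (by omega)⟩]
        have e2 : t.getD (m + 1, j + len - 1) 0 = (pvG c (m+1) (j + len - 1)).length := by
          rw [h, if_pos ⟨by omega, Or.inl (by omega)⟩]
        rw [e1, e2, pvCand, List.length_append]
    · intro hcon; exact absurd hr hcon
  · simp only [if_true]
    refine pvBInv2_succ c n len j t _ (by omega) ?_ ?_ ?_ h
    · intro l r hc
      rw [PySem.Dict.getD_insert, if_neg (by simp; tauto)]
    · intro _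
      rw [PySem.Dict.getD_insert, if_pos rfl]
      by_cases h2 : 2 < len
      · rw [if_pos h2]
        have hd : t.getD (j + 1, j + len - 1 - 1) 0 = (pvG c (j+1) (j + len - 1 - 1)).length := by
          rw [h, if_pos ⟨by omega, Or.inl (by omega)⟩]
        rw [hd, pvG_match c (by omega) hmch]
        simp only [List.length_cons, List.length_append, List.length_nil]
        omega
      · rw [if_neg h2]
        have hl2 : len = 2 := by omega
        rw [pvG_two c (by omega), if_pos hmch]
        rfl
    · intro hcon; exact absurd hr hcon

lemma pvBinner_loop (c : Nat → Char) (n len : Nat) (hlen : 2 ≤ len) :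
    ∀ (cnt j : Nat) (t : PySem.Dict (Nat × Nat) Nat), j + cnt + len - 1 ≤ n →
      pvBInv2 c n len j t →
      pvBInv2 c n len (j + cnt) ((List.range' j cnt).foldl (pvBinner c len) t) := by
  intro cnt
  induction cnt with
  | zero => intro j t _ h; simpa using h
  | succ cnt ih =>
      intro j t hb h
      rw [List.range'_succ, List.foldl_cons]
      have hstep := pvBinner_step c n len j t hlen (by omega) h
      have := ih (j + 1) _ (by omega) hstep
      rw [show j + (cnt + 1) = j + 1 + cnt from by omega]
      exact this

lemma pvBouter_one (c : Nat → Char) (n len : Nat) (h1 : 2 ≤ len) (h2 : len ≤ n)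
    (t : PySem.Dict (Nat × Nat) Nat) (h : pvBInv c n (len - 1) t) :
    pvBInv c n len (pvBouter c n t len) := by
  unfold pvBouter
  rw [List.range_eq_range']
  have h0 : pvBInv2 c n len 0 t := by
    intro l r
    rw [h l r]
    split_ifs with a b b
    · rfl
    · exfalso; omega
    · exfalso; omega
    · rfl
  have := pvBinner_loop c n len h1 (n - len + 1) 0 t (by omega) h0
  intro l r
  rw [this l r]
  split_ifs with a b b
  · rfl
  · exfalso; omega
  · exfalso; omega
  · rfl

lemma pvBouter_loop (c : Nat → Char) (n : Nat) :
    ∀ (cnt k : Nat) (t : PySem.Dict (Nat × Nat) Nat), 1 ≤ k → k + cnt ≤ n → pvBInv c n k t →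
      pvBInv c n (k + cnt) ((List.range' (k + 1) cnt).foldl (pvBouter c n) t) := by
  intro cnt
  induction cnt with
  | zero => intro k t _ _ h; simpa using h
  | succ cnt ih =>
      intro k t hk hb h
      rw [List.range'_succ, List.foldl_cons]
      have hstep : pvBInv c n (k + 1) (pvBouter c n t (k + 1)) := by
        refine pvBouter_one c n (k + 1) (by omega) (by omega) t ?_
        simpa using h
      have := ih (k + 1) _ (by omega) (by omega) hstep
      rw [show k + (cnt + 1) = k + 1 + cnt from by omega]
      exact this

-- reconstruction: pvBuild on a table of pvG-lengths rebuilds pvG itself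
lemma pvBuild_eq (c : Nat → Char) (n : Nat) (t : PySem.Dict (Nat × Nat) Nat)
    (ht : ∀ i j : Nat, j < n → t.getD (i, j) 0 = (pvG c i j).length) :
    ∀ (d l r : Nat), r - l ≤ d → r < n → pvBuild c t l r = pvG c l r := by
  intro d
  induction d with
  | zero =>
      intro l r hd _
      have : r ≤ l := by omega
      rw [pvBuild, dif_pos this, pvG_nil c this]
  | succ d ih =>
      intro l r hd hr
      by_cases hle : r ≤ l
      · rw [pvBuild, dif_pos hle, pvG_nil c hle]
      · rw [pvBuild, dif_neg hle]
        have h0 : t.getD (l, r) 0 = (pvG c l r).length := ht l r hr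
        by_cases hz : t.getD (l, r) 0 = 0
        · rw [if_pos hz]
          rw [h0] at hz
          exact (List.eq_nil_iff_length_eq_zero.mpr hz).symm
        · rw [if_neg hz]
          cases hmch : pvMatch (c l) (c r)
          · simp only [Bool.false_eq_true, if_false]
            by_cases h2 : r = l + 1
            · exfalso
              apply hz
              rw [h0, pvG_two c h2, if_neg (by simp [hmch])]
              rfl
            · have hlt : l + 1 < r := by omega
              have hsplit := pvG_split c hlt (by simpa using hmch)
              have hpos : 0 < (pvG c l r).length := by omega
              rw [hsplit] at hpos
              obtain ⟨m, hf, he⟩ :=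
                (pvRun_spec (pvCand c l r) (List.range' (l+1) (r - (l+1))) []).2 (by simpa using hpos)
              have hmem := List.mem_of_find?_eq_some hf
              have hbm := List.mem_range'_1.mp hmem
              have hfind : (List.range' (l+1) (r - (l+1))).find?
                  (fun m => t.getD (l, m) 0 + t.getD (m+1, r) 0 == t.getD (l, r) 0)
                  = some m := by
                rw [pvFind_congr (q := fun m => (pvCand c l r m).length ==
                    (pvRun (pvCand c l r) (List.range' (l+1) (r - (l+1))) []).length)]
                · rw [← hsplit] at hf ⊢; exact hf
                · intro m' hm'
                  have hb' := List.mem_range'_1.mp hm'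
                  have e1 := ht l m' (by omega)
                  have e2 := ht (m'+1) r hr
                  rw [e1, e2, h0, hsplit, pvCand, List.length_append]
              rw [hfind]
              have r1 : pvBuild c t l m = pvG c l m := ih l m (by omega) (by omega)
              have r2 : pvBuild c t (m+1) r = pvG c (m+1) r := ih (m+1) r (by omega) hr
              show pvBuild c t l m ++ pvBuild c t (m+1) r = pvG c l r
              rw [r1, r2, hsplit, he]
              rfl
          · simp only [if_true]
            by_cases h2 : r = l + 1
            · rw [dif_neg (by omega), pvG_two c h2, if_pos hmch]
              simp [h2]
            · have hlt : l + 1 < r := by omega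
              rw [dif_pos (by omega), pvG_match c hlt hmch]
              have := ih (l+1) (r-1) (by omega) (by omega)
              rw [this]

-- ===== VERDICT =====
theorem delSeq_spec : Claim_equal_delSeq := by
  unfold Claim_equal_delSeq Spec_delSeq Pre_delSeq
  intro s _ hpre
  have hne : s.toList ≠ [] := by
    intro hcon; exact hpre (String.toList_eq_nil_iff.mp hcon)
  have hn : 1 ≤ s.toList.length := by
    rcases Nat.eq_zero_or_pos s.toList.length with h0 | h0
    · exact absurd (List.eq_nil_iff_length_eq_zero.mpr h0) hne
    · exact h0
  rw [delSeq_eq s hne]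
  simp only [delSeq_alt]
  rw [if_neg (by omega)]
  congr 1
  have h0 : pvBInv (fun i => s.toList.getD i ' ') s.toList.length 1 PySem.Dict.empty := by
    intro l r
    rw [PySem.Dict.getD_empty]
    split_ifs with hh
    · rw [pvG_nil _ (by omega)]
      rfl
    · rfl
  have hall := pvBouter_loop (fun i => s.toList.getD i ' ') s.toList.length (s.toList.length - 1)
    1 PySem.Dict.empty (by omega) (by omega) h0
  rw [show (1 : Nat) + 1 = 2 from rfl] at hall
  have ht : ∀ i j : Nat, j < s.toList.length →
      ((List.range' 2 (s.toList.length - 1)).foldl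
        (pvBouter (fun i => s.toList.getD i ' ') s.toList.length) PySem.Dict.empty).getD (i, j) 0
      = (pvG (fun i => s.toList.getD i ' ') i j).length := by
    intro i j hj
    rw [hall i j, if_pos ⟨hj, by omega⟩]
  exact (pvBuild_eq (fun i => s.toList.getD i ' ') s.toList.length _ ht
    (s.toList.length - 1) 0 (s.toList.length - 1) (by omega) (by omega)).symm
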